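-- pv_equiv track=rewrite | github.com/grlee77/pywt | pywt/tests/test_wp.py | _wavedec_keys
-- ===== SOURCE A (Python) =====
-- def _wavedec_keys(level):
--     # return wavelet packet keys corresponding to a wavedec decomposition
--     approx = ''
--     coeffs = {}
--     for lev in range(level):
--         for k in ['a', 'd']:
--             coeffs[approx + k] = None
--         approx = 'a' * (lev + 1)
--         if lev < level - 1:
--             coeffs.pop(approx)
--     return list(coeffs.keys())
-- ===== SOURCE B (Python) =====
-- def _wavedec_keys(level):
--     # Build the key list directly: one detail key per level, plus the final
--     # approximation key inserted just before the last detail key.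
--     keys = []
--     for lev in range(level):
--         if lev == level - 1:
--             keys.append('a' * level)
--         keys.append('a' * lev + 'd')
--     return keys
-- ===== Notes on version B (the rewrite author's own statement) =====
-- stated objective: simpler
-- what changed: Replaces A's dict with per-level insert-two-keys-then-pop bookkeeping by directly appending one detail key per level and the final approximation key before the last detail; no dict, no pop.
import Mathlib
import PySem

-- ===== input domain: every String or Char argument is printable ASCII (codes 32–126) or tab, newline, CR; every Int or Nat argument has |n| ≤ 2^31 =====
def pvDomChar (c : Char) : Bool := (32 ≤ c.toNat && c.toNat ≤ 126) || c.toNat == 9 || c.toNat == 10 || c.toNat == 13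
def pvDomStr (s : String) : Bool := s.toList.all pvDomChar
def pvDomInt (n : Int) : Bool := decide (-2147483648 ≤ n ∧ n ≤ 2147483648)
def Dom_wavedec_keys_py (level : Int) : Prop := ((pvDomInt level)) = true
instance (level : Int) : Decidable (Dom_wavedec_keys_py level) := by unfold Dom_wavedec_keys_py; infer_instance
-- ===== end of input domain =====

-- B replaces A's dict-insert-then-pop bookkeeping by direct conditional appends to the result list (objective: simpler).

-- ===== PORT A =====
-- body of A's `for lev in range(level)` loop; state = (approx, coeffs); dict values (Python None) are `none : Option Unit`
def wavedecStepA (level : Int) (st : String × PySem.Dict String (Option Unit)) (lev : Int) :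
    String × PySem.Dict String (Option Unit) :=
  -- for k in ['a', 'd']: coeffs[approx + k] = None
  let coeffs := ["a", "d"].foldl (fun c k => c.insert (st.1 ++ k) (none : Option Unit)) st.2
  -- approx = 'a' * (lev + 1)  (string repetition, exact here since lev ≥ 0 comes from range)
  let approx := String.ofList (List.replicate (lev + 1).toNat 'a')
  -- coeffs.pop(approx): approx was inserted this iteration, so pop never raises; erase is exact
  let coeffs := if lev < level - 1 then coeffs.erase approx else coeffs
  (approx, coeffs)

def wavedec_keys_py (level : Int) : List String :=
  ((PySem.List.pyRange 0 level 1).foldl (wavedecStepA level) ("", PySem.Dict.empty)).2.keys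

-- ===== PORT B =====
-- body of B's `for lev in range(level)` loop over the result list
def wavedecStepB (level : Int) (keys : List String) (lev : Int) : List String :=
  let keys := if lev == level - 1 then keys ++ [String.ofList (List.replicate level.toNat 'a')] else keys
  keys ++ [String.ofList (List.replicate lev.toNat 'a') ++ "d"]

def wavedec_keys_py_alt (level : Int) : List String :=
  (PySem.List.pyRange 0 level 1).foldl (wavedecStepB level) []

-- ===== PRECONDITION & SPEC =====
def Spec_wavedec_keys_py (level : Int) (out : List String) : Prop := out = wavedec_keys_py_alt level
instance (level : Int) (out : List String) : Decidable (Spec_wavedec_keys_py level out) := by unfold Spec_wavedec_keys_py; infer_instance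

-- ===== CLAIM (what is proved, stated in full; the proofs are below) =====
def Claim_equal_wavedec_keys_py : Prop := ∀ (level : Int), Dom_wavedec_keys_py level → Spec_wavedec_keys_py level (wavedec_keys_py level)

-- ===== LEMMAS AND PROOFS =====

def pvRep (k : Nat) : String := String.ofList (List.replicate k 'a')
def pvDet (i : Nat) : String := String.ofList (List.replicate i 'a' ++ ['d'])
def pvItems (j : Nat) : List (String × Option Unit) := (List.range j).map (fun i => (pvDet i, none))

theorem pv_ofList_inj {la lb : List Char} : String.ofList la = String.ofList lb ↔ la = lb :=
  ⟨fun h => by simpa using congrArg String.toList h, fun h => h ▸ rfl⟩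

theorem pv_rep_a (m : Nat) : pvRep m ++ "a" = pvRep (m + 1) := by
  show pvRep m ++ String.ofList ['a'] = pvRep (m + 1)
  simp [pvRep, List.replicate_succ']

theorem pv_rep_d (m : Nat) : pvRep m ++ "d" = pvDet m := by
  show pvRep m ++ String.ofList ['d'] = pvDet m
  simp [pvRep, pvDet]

theorem pv_det_ne_rep (i k : Nat) : pvDet i ≠ pvRep k := by
  intro h
  rw [pvDet, pvRep, pv_ofList_inj] at h
  have hd : 'd' ∈ List.replicate k 'a' := by rw [← h]; simp
  exact absurd (List.eq_of_mem_replicate hd) (by decide)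

theorem pv_det_inj {i j : Nat} (h : pvDet i = pvDet j) : i = j := by
  rw [pvDet, pvDet, pv_ofList_inj] at h
  have := congrArg List.length h
  simpa using this

theorem pv_items_erase {κ ν : Type} [BEq κ] (d : PySem.Dict κ ν) (k : κ) :
    (d.erase k).items = d.items.filter (fun p => !(p.1 == k)) := by
  simp [PySem.Dict.erase]

theorem pv_contains_mk_false {ν : Type} {items : List (String × ν)} {k : String}
    (h : k ∉ items.map (·.1)) : (PySem.Dict.mk items).contains k = false := by
  rw [PySem.Dict.contains_eq_decide_mem_keys]
  simp only [PySem.Dict.keys]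
  simpa using h

theorem pv_rep_not_mem (j k : Nat) : pvRep k ∉ (pvItems j).map (·.1) := by
  simp only [pvItems, List.map_map]
  intro h
  obtain ⟨i, _, hi⟩ := List.mem_map.mp h
  exact pv_det_ne_rep i k hi

theorem pv_det_not_mem (j : Nat) : pvDet j ∉ (pvItems j).map (·.1) := by
  simp only [pvItems, List.map_map]
  intro h
  obtain ⟨i, hmem, hi⟩ := List.mem_map.mp h
  simp only [Function.comp] at hi
  cases pv_det_inj hi
  exact absurd hmem (by simp)

-- the two inserts of one iteration of A, from the invariant state
theorem pv_insert2 (j : Nat) :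
    (["a", "d"].foldl (fun c k => c.insert ((pvRep j : String) ++ k) (none : Option Unit))
        (PySem.Dict.mk (pvItems j))) =
      PySem.Dict.mk (pvItems j ++ [(pvRep (j+1), none), (pvDet j, none)]) := by
  simp only [List.foldl]
  rw [pv_rep_a, pv_rep_d]
  have h1 : (PySem.Dict.mk (pvItems j)).contains (pvRep (j+1)) = false :=
    pv_contains_mk_false (pv_rep_not_mem j (j+1))
  have E1 : (PySem.Dict.mk (pvItems j)).insert (pvRep (j+1)) none
      = PySem.Dict.mk (pvItems j ++ [(pvRep (j+1), none)]) := by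
    apply PySem.Dict.ext
    rw [PySem.Dict.items_insert_of_not_contains _ _ h1]
  rw [E1]
  have h2 : (PySem.Dict.mk (pvItems j ++ [(pvRep (j+1), none)])).contains (pvDet j) = false := by
    apply pv_contains_mk_false
    simp only [List.map_append, List.mem_append]
    rintro (h | h)
    · exact pv_det_not_mem j h
    · simp at h; exact pv_det_ne_rep j (j+1) h
  apply PySem.Dict.ext
  rw [PySem.Dict.items_insert_of_not_contains _ _ h2]
  simp

theorem pv_toNat_succ (j : Nat) : ((j : Int) + 1).toNat = j + 1 := by omega

theorem pv_stepA_mid (n j : Nat) (h : j + 1 < n) :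
    wavedecStepA (n : Int) (pvRep j, PySem.Dict.mk (pvItems j)) (j : Int)
      = (pvRep (j+1), PySem.Dict.mk (pvItems (j+1))) := by
  simp only [wavedecStepA]
  rw [pv_insert2, pv_toNat_succ]
  rw [if_pos (by omega : (j : Int) < (n : Int) - 1)]
  refine congrArg (fun d => (pvRep (j+1), d)) ?_
  apply PySem.Dict.ext
  rw [pv_items_erase]
  show (pvItems j ++ [(pvRep (j+1), none), (pvDet j, none)]).filter
      (fun p => !(p.1 == pvRep (j+1))) = pvItems (j+1)
  rw [List.filter_append]
  have hfil : (pvItems j).filter (fun p => !(p.1 == pvRep (j+1))) = pvItems j := by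
    apply List.filter_eq_self.mpr
    intro p hp
    simp only [pvItems, List.mem_map] at hp
    obtain ⟨i, _, rfl⟩ := hp
    simp [pv_det_ne_rep i (j+1)]
  rw [hfil]
  simp [pv_det_ne_rep j (j+1), pvItems, List.range_succ]

theorem pv_stepA_last (j : Nat) :
    wavedecStepA ((j+1 : Nat) : Int) (pvRep j, PySem.Dict.mk (pvItems j)) (j : Int)
      = (pvRep (j+1), PySem.Dict.mk (pvItems j ++ [(pvRep (j+1), none), (pvDet j, none)])) := by
  simp only [wavedecStepA]
  rw [pv_insert2, pv_toNat_succ]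
  rw [if_neg (by push_cast; omega : ¬ ((j : Int) < ((j+1 : Nat) : Int) - 1))]
  rfl

theorem pv_stepB_mid (n j : Nat) (h : j + 1 < n) (ks : List String) :
    wavedecStepB (n : Int) ks (j : Int) = ks ++ [pvDet j] := by
  simp only [wavedecStepB]
  rw [if_neg (by simp; omega : ¬ (((j : Int) == (n : Int) - 1) = true))]
  rw [show ((j : Int)).toNat = j from by omega,
      show String.ofList (List.replicate j 'a') ++ "d" = pvDet j from pv_rep_d j]

theorem pv_stepB_last (j : Nat) (ks : List String) :
    wavedecStepB ((j+1 : Nat) : Int) ks (j : Int) = ks ++ [pvRep (j+1), pvDet j] := by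
  simp only [wavedecStepB]
  rw [if_pos (by simp only [beq_iff_eq]; push_cast; omega : (((j : Int) == ((j+1 : Nat) : Int) - 1) = true))]
  rw [show (((j+1 : Nat) : Int)).toNat = j + 1 from by omega,
      show ((j : Int)).toNat = j from by omega,
      show String.ofList (List.replicate j 'a') ++ "d" = pvDet j from pv_rep_d j,
      show String.ofList (List.replicate (j+1) 'a') = pvRep (j+1) from rfl]
  show ks ++ [pvRep (j+1)] ++ [pvDet j] = ks ++ [pvRep (j+1), pvDet j]
  simp

theorem pv_A_prefix (n m : Nat) (h : m < n) :
    (PySem.List.pyRange 0 (m : Int) 1).foldl (wavedecStepA (n : Int)) ("", PySem.Dict.empty)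
      = (pvRep m, PySem.Dict.mk (pvItems m)) := by
  induction m with
  | zero =>
    rw [PySem.List.pyRange_one_eq_nil (by omega)]
    simp [pvRep, pvItems, PySem.Dict.empty]
  | succ m ih =>
    rw [show ((m+1 : Nat) : Int) = (m : Int) + 1 from by push_cast; rfl,
        PySem.List.pyRange_one_succ_right (by omega), List.foldl_append, ih (by omega)]
    exact pv_stepA_mid n m h

theorem pv_B_prefix (n m : Nat) (h : m < n) :
    (PySem.List.pyRange 0 (m : Int) 1).foldl (wavedecStepB (n : Int)) []
      = (List.range m).map pvDet := by
  induction m with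
  | zero =>
    rw [PySem.List.pyRange_one_eq_nil (by omega)]
    simp
  | succ m ih =>
    rw [show ((m+1 : Nat) : Int) = (m : Int) + 1 from by push_cast; rfl,
        PySem.List.pyRange_one_succ_right (by omega), List.foldl_append, ih (by omega)]
    rw [List.foldl_cons, List.foldl_nil, pv_stepB_mid n m h]
    simp [List.range_succ]

theorem pv_main (j : Nat) :
    wavedec_keys_py ((j+1 : Nat) : Int) = wavedec_keys_py_alt ((j+1 : Nat) : Int) := by
  unfold wavedec_keys_py wavedec_keys_py_alt
  have e' : PySem.List.pyRange 0 ((j+1 : Nat) : Int) 1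
      = PySem.List.pyRange 0 (j : Int) 1 ++ [(j : Int)] := by
    rw [show ((j+1 : Nat) : Int) = (j : Int) + 1 from by push_cast; rfl]
    exact PySem.List.pyRange_one_succ_right (by omega)
  rw [e', List.foldl_append, List.foldl_append,
      pv_A_prefix (j+1) j (by omega), pv_B_prefix (j+1) j (by omega),
      List.foldl_cons, List.foldl_nil, List.foldl_cons, List.foldl_nil,
      pv_stepA_last j, pv_stepB_last j]
  simp [PySem.Dict.keys, pvItems]

-- ===== VERDICT (by name: the statement is the Claim_ definition above) =====
theorem wavedec_keys_py_spec : Claim_equal_wavedec_keys_py := by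
  intro level _
  unfold Spec_wavedec_keys_py
  by_cases h : level ≤ 0
  · unfold wavedec_keys_py wavedec_keys_py_alt
    rw [PySem.List.pyRange_one_eq_nil h]
    simp [PySem.Dict.empty, PySem.Dict.keys]
  · obtain ⟨n, hn⟩ : ∃ n : Nat, level = ((n+1 : Nat) : Int) := ⟨(level.toNat - 1), by omega⟩
    rw [hn]
    exact pv_main n
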